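-- pv_equiv track=rewrite | github.com/adriano-arce/Interview-Problems | Advent-Of-Code-2016/07-ABBA-Matching/07-ABBA-Matching.py | get_aba_set
-- ===== SOURCE A (Python) =====
-- def get_aba_set(s, reverse=False):
--     aba_set = set()
--     for i in range(len(s) - 3 + 1):
--         aba = s[i:i+3]
--         if aba[0] == aba[2] and aba[0] != aba[1]:
--             a, b = aba[0], aba[1]
--             if reverse:
--                 a, b = b, a
--             aba_set.add((a, b))
--     return aba_set
-- ===== SOURCE B (Python) =====
-- def get_aba_set(s, reverse=False):
--     # Different algorithm: build a char -> positions index, find ABA centres by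
--     # set-membership (p and p+2 in the same character class), then a sort
--     # restores left-to-right first-occurrence insertion order.
--     occ = {}
--     for i, ch in enumerate(s):
--         occ.setdefault(ch, []).append(i)
--     hits = []
--     for ch, ps in occ.items():
--         qs = set(ps)
--         for p in ps:
--             if p + 2 in qs and s[p + 1] != ch:
--                 hits.append(p)
--     hits.sort()
--     out = set()
--     for p in hits:
--         pair = (s[p + 1], s[p]) if reverse else (s[p], s[p + 1])
--         out.add(pair)
--     return out
-- ===== Notes on version B (the rewrite author's own statement) =====
-- stated objective: alternative
-- what changed: Replaced A's single sliding-window scan over 3-character slices by an index-based algorithm: group positions by character in a dict, detect ABA centres by set membership of p+2 in the same character class, sort the centre positions back into scan order, then build the result set.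
import Mathlib
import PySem

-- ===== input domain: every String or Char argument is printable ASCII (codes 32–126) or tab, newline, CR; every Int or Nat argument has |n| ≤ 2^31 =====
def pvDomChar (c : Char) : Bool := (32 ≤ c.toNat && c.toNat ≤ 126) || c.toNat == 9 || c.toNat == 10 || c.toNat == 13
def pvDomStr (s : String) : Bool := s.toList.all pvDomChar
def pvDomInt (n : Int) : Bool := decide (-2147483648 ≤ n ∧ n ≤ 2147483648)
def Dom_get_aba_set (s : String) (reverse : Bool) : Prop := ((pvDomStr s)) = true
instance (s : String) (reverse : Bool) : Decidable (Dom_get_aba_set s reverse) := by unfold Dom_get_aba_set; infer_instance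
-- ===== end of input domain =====

-- B replaces A's sliding-window index loop by a different algorithm: group positions
-- by character in a dict, find ABA centres by set membership (p and p+2 in the same
-- class), sort the centres back into scan order, then build the set (alternative;
-- not claimed faster).

-- ===== PORT A =====
-- Literal port of A: loop i over range(len(s)-3+1), slice s[i:i+3], test
-- aba[0]==aba[2] and aba[0]!=aba[1], swap on reverse, add to the set.
-- The pyGet? lookups are always `some` (the slice has length 3 inside the range);
-- the fallthrough arm is unreachable.
def get_aba_set (s : String) (reverse : Bool) : List (String × String) :=
  (PySem.List.pyRange 0 ((s.toList.length : Int) - 3 + 1) 1).foldl (fun aba_set i =>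
    let aba := PySem.List.slice s.toList (some i) (some (i + 3))
    match PySem.List.pyGet? aba 0, PySem.List.pyGet? aba 1, PySem.List.pyGet? aba 2 with
    | some c0, some c1, some c2 =>
        if c0 = c2 ∧ c0 ≠ c1 then
          let a := if reverse then c1 else c0
          let b := if reverse then c0 else c1
          PySem.Set.add aba_set (String.mk [a], String.mk [b])
        else aba_set
    | _, _, _ => aba_set) []

-- ===== PORT B =====
-- Literal port of B (Source B): occ.setdefault(ch, []).append(i) is Dict.modify ch [] (· ++ [i]);
-- then the items loop collecting hits, hits.sort(), and the final set-building loop.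
-- The pyGet? indexings s[p+1] / s[p] are guarded matches; the none arms are unreachable.
def get_aba_set_alt (s : String) (reverse : Bool) : List (String × String) :=
  let cs := s.toList
  let occ := (PySem.List.enumerate cs).foldl
      (fun d p => d.modify p.2 [] (fun ps => ps ++ [p.1])) PySem.Dict.empty
  let hits := occ.items.foldl (fun h e =>
      let qs := PySem.Set.ofList e.2
      e.2.foldl (fun h p =>
        if PySem.Set.contains qs (p + 2) then
          match PySem.List.pyGet? cs (p + 1) with
          | some b => if b ≠ e.1 then h ++ [p] else h
          | none => h
        else h) h) []
  let sortedHits := PySem.List.sorted hits (fun x => x) false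
  sortedHits.foldl (fun out p =>
    match PySem.List.pyGet? cs p with
    | some a =>
        match PySem.List.pyGet? cs (p + 1) with
        | some b =>
            PySem.Set.add out (if reverse then (String.mk [b], String.mk [a])
                               else (String.mk [a], String.mk [b]))
        | none => out
    | none => out) []

-- ===== PRECONDITION & SPEC =====
def Spec_get_aba_set (s : String) (reverse : Bool) (out : List (String × String)) : Prop := out = get_aba_set_alt s reverse
instance (s : String) (reverse : Bool) (out : List (String × String)) : Decidable (Spec_get_aba_set s reverse out) := by unfold Spec_get_aba_set; infer_instance

-- ===== CLAIM (what is proved, stated in full; the proofs are below) =====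
def Claim_equal_get_aba_set : Prop := ∀ (s : String) (reverse : Bool), Dom_get_aba_set s reverse → Spec_get_aba_set s reverse (get_aba_set s reverse)

-- ===== LEMMAS AND PROOFS =====

def pvGood (cs : List Char) (k : Nat) : Bool :=
  match cs[k]?, cs[k+1]?, cs[k+2]? with
  | some a, some b, some c => a == c && !(a == b)
  | _, _, _ => false
def pvPairAt (reverse : Bool) (cs : List Char) (k : Nat) : String × String :=
  match cs[k]?, cs[k+1]? with
  | some a, some b =>
      if reverse then (String.mk [b], String.mk [a]) else (String.mk [a], String.mk [b])
  | _, _ => ("", "")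
def pvG (cs : List Char) : List Nat := (List.range cs.length).filter (pvGood cs)
theorem pvGood_lt {cs : List Char} {k : Nat} (h : pvGood cs k = true) : k + 2 < cs.length := by
  unfold pvGood at h
  split at h
  · next a b c h0 h1 h2 => exact (List.getElem?_eq_some_iff.mp h2).1
  · exact absurd h (by simp)
theorem pvG_eq_filter_sub (cs : List Char) :
    pvG cs = (List.range (cs.length - 2)).filter (pvGood cs) := by
  by_cases h : cs.length ≤ 2
  · have h2 : cs.length - 2 = 0 := by omega
    rw [pvG, h2]
    simp only [List.range_zero, List.filter_nil]
    rw [List.filter_eq_nil_iff]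
    intro k hk hg
    have := pvGood_lt hg
    have := List.mem_range.mp hk
    omega
  · have h2 : cs.length = (cs.length - 2) + 2 := by omega
    rw [pvG]
    conv_lhs => rw [h2, List.range_add, List.filter_append]
    have hnil : (List.filter (pvGood cs) (List.map (fun x => cs.length - 2 + x) (List.range 2))) = [] := by
      rw [List.filter_eq_nil_iff]
      intro k hk hg
      have hlt := pvGood_lt hg
      rcases List.mem_map.mp hk with ⟨j, hj, rfl⟩
      have := List.mem_range.mp hj
      omega
    rw [hnil, List.append_nil]

def pvGInt (cs : List Char) : List Int := (pvG cs).map (fun k : Nat => (k : Int))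
def pvPosL (cs : List Char) (c : Char) : List Int :=
  ((PySem.List.enumerate cs).filter (fun p => p.2 == c)).map (fun p => p.1)
def pvCond (cs : List Char) (c : Char) (qs : PySem.Set Int) (p : Int) : Bool :=
  PySem.Set.contains qs (p + 2) &&
    (match PySem.List.pyGet? cs (p + 1) with
     | some b => b != c
     | none => false)
def pvSel (cs : List Char) (c : Char) : List Int :=
  (pvPosL cs c).filter (pvCond cs c (PySem.Set.ofList (pvPosL cs c)))

theorem pvA_eq (s : String) (reverse : Bool) :
    get_aba_set s reverse
      = ((pvG s.toList).map (pvPairAt reverse s.toList)).foldl PySem.Set.add [] := by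
  unfold get_aba_set
  rw [PySem.List.pyRange_one]
  have hm : (((s.toList.length : Int) - 3 + 1) - 0).toNat = s.toList.length - 2 := by omega
  rw [hm, List.foldl_map, List.foldl_map, pvG_eq_filter_sub, List.foldl_filter]
  apply PySem.List.foldl_congr_mem
  intro acc k hk
  have hk2 : k + 2 < s.toList.length := by
    have := List.mem_range.mp hk; omega
  have h0 : s.toList[k]? = some s.toList[k] := List.getElem?_eq_getElem (by omega)
  have h1 : s.toList[k+1]? = some s.toList[k+1] := List.getElem?_eq_getElem (by omega)
  have h2 : s.toList[k+2]? = some s.toList[k+2] := List.getElem?_eq_getElem (by omega)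
  have hcast : ((0 : Int) + (k : Int) + 3) = ((k + 3 : Nat) : Int) := by push_cast; ring
  have hcast0 : ((0 : Int) + (k : Int)) = ((k : Nat) : Int) := by ring
  have hwin : PySem.List.slice s.toList (some ((0:Int) + (k:Int))) (some ((0:Int) + (k:Int) + 3))
      = [s.toList[k], s.toList[k+1], s.toList[k+2]] := by
    rw [hcast, hcast0, PySem.List.slice_natCast]
    have h3 : k + 3 - k = 3 := by omega
    rw [h3, List.drop_eq_getElem_cons (by omega : k < s.toList.length),
        List.drop_eq_getElem_cons (by omega : k + 1 < s.toList.length),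
        List.drop_eq_getElem_cons (by omega : k + 2 < s.toList.length)]
    rfl
  simp only [hwin]
  have hg : pvGood s.toList k = (s.toList[k] == s.toList[k+2] && !(s.toList[k] == s.toList[k+1])) := by
    unfold pvGood
    rw [h0, h1, h2]
  have hp : pvPairAt reverse s.toList k
      = (if reverse then (String.mk [s.toList[k+1]], String.mk [s.toList[k]])
         else (String.mk [s.toList[k]], String.mk [s.toList[k+1]])) := by
    unfold pvPairAt
    rw [h0, h1]
  have e0 : PySem.List.pyGet? [s.toList[k], s.toList[k+1], s.toList[k+2]] (0:Int)
      = some s.toList[k] := rfl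
  have e1 : PySem.List.pyGet? [s.toList[k], s.toList[k+1], s.toList[k+2]] (1:Int)
      = some s.toList[k+1] := rfl
  have e2 : PySem.List.pyGet? [s.toList[k], s.toList[k+1], s.toList[k+2]] (2:Int)
      = some s.toList[k+2] := rfl
  rw [hg, hp, e0, e1, e2]
  show (if s.toList[k] = s.toList[k + 2] ∧ s.toList[k] ≠ s.toList[k + 1] then
        PySem.Set.add acc (String.mk [if reverse = true then s.toList[k + 1] else s.toList[k]],
          String.mk [if reverse = true then s.toList[k] else s.toList[k + 1]])
      else acc) = _
  by_cases hc : s.toList[k] = s.toList[k+2] ∧ s.toList[k] ≠ s.toList[k+1]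
  · rw [if_pos hc]
    have hb : (s.toList[k] == s.toList[k+2] && !(s.toList[k] == s.toList[k+1])) = true := by
      simp [hc.1, hc.1 ▸ hc.2]
    rw [hb, if_pos rfl]
    cases reverse <;> rfl
  · rw [if_neg hc]
    have hb : (s.toList[k] == s.toList[k+2] && !(s.toList[k] == s.toList[k+1])) = false := by
      by_cases hx : s.toList[k] = s.toList[k+2] <;> by_cases hy : s.toList[k] = s.toList[k+1] <;> simp_all
    rw [hb]
    simp

theorem pvOcc_items (cs : List Char) :
    ((PySem.List.enumerate cs).foldl
        (fun d p => d.modify p.2 [] (fun ps => ps ++ [p.1])) PySem.Dict.empty).items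
      = (PySem.Set.ofList cs).map (fun c => (c, pvPosL cs c)) := by
  have hnd : ((PySem.List.enumerate cs).foldl
      (fun d p => d.modify p.2 [] (fun ps => ps ++ [p.1])) PySem.Dict.empty).keys.Nodup :=
    PySem.Dict.nodup_keys_foldl_modify_key (PySem.List.enumerate cs) (fun p => p.2) []
      (fun _ p ps => ps ++ [p.1]) PySem.Dict.empty PySem.Dict.nodup_keys_empty
  have hkeys : ((PySem.List.enumerate cs).foldl
      (fun d p => d.modify p.2 [] (fun ps => ps ++ [p.1])) PySem.Dict.empty).keys
      = PySem.Set.ofList cs := by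
    rw [PySem.Dict.keys_foldl_modify_key (PySem.List.enumerate cs) (fun p => p.2) []
      (fun _ p ps => ps ++ [p.1]) PySem.Dict.empty]
    rw [PySem.Dict.keys_empty, PySem.List.map_snd_enumerate, PySem.Set.update_nil_left]
  have hget : ∀ c, ((PySem.List.enumerate cs).foldl
      (fun d p => d.modify p.2 [] (fun ps => ps ++ [p.1])) PySem.Dict.empty).getD c []
      = pvPosL cs c := by
    intro c
    have hsw : (PySem.List.enumerate cs).foldl
        (fun d p => d.modify p.2 [] (fun ps => ps ++ [p.1])) PySem.Dict.empty
        = ((PySem.List.enumerate cs).map (fun p => (p.2, p.1))).foldl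
            (fun d q => d.modify q.1 [] (fun x => x ++ [q.2])) PySem.Dict.empty := by
      rw [List.foldl_map]
    rw [hsw, PySem.Dict.getD_foldl_modify_append, PySem.Dict.getD_empty, List.nil_append,
        List.filter_map, List.map_map, pvPosL]
    apply List.map_congr_left
    intro p _
    rfl
  rw [PySem.Dict.items_eq_map_keys _ hnd [], hkeys]
  apply List.map_congr_left
  intro c _
  rw [hget]

theorem pvHits_eq (cs : List Char) :
    ((PySem.Set.ofList cs).map (fun c => (c, pvPosL cs c))).foldl (fun h e =>
        let qs := PySem.Set.ofList e.2
        e.2.foldl (fun h p =>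
          if PySem.Set.contains qs (p + 2) then
            match PySem.List.pyGet? cs (p + 1) with
            | some b => if b ≠ e.1 then h ++ [p] else h
            | none => h
          else h) h) []
      = (PySem.Set.ofList cs).flatMap (fun c => pvSel cs c) := by
  rw [List.foldl_map]
  have hbody : List.foldl (fun (h : List Int) c =>
        let qs := PySem.Set.ofList (pvPosL cs c)
        (pvPosL cs c).foldl (fun h p =>
          if PySem.Set.contains qs (p + 2) then
            match PySem.List.pyGet? cs (p + 1) with
            | some b => if b ≠ c then h ++ [p] else h
            | none => h
          else h) h) [] (PySem.Set.ofList cs)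
      = List.foldl (fun h c => h ++ pvSel cs c) [] (PySem.Set.ofList cs) := by
    apply PySem.List.foldl_congr_mem
    intro h c _
    show (pvPosL cs c).foldl _ h = _
    have hione : ∀ (h : List Int) (p : Int),
        (if PySem.Set.contains (PySem.Set.ofList (pvPosL cs c)) (p + 2) then
           match PySem.List.pyGet? cs (p + 1) with
           | some b => if b ≠ c then h ++ [p] else h
           | none => h
         else h)
        = if pvCond cs c (PySem.Set.ofList (pvPosL cs c)) p then h ++ [p] else h := by
      intro h p
      cases hq : PySem.Set.contains (PySem.Set.ofList (pvPosL cs c)) (p + 2) <;>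
        cases hg : PySem.List.pyGet? cs (p + 1) with
        | none => simp [pvCond, hg]
        | some b =>
            simp only [pvCond, hq, hg]
            by_cases hbc : b = c <;> simp [hbc]
    rw [PySem.List.foldl_congr_mem _ _ _ h (fun h p _ => hione h p),
        PySem.List.foldl_append_if_eq_filter]
    rfl
  rw [hbody, PySem.List.foldl_append_eq_flatMap, List.nil_append]

theorem pv_mem_posL {cs : List Char} {c : Char} {x : Int} :
    x ∈ pvPosL cs c ↔ ∃ k, ∃ _ : k < cs.length, x = (k : Int) ∧ cs[k] = c := by
  unfold pvPosL
  simp only [List.mem_map, List.mem_filter, PySem.List.mem_enumerate_iff]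
  constructor
  · rintro ⟨p, ⟨⟨k, hk, rfl⟩, hbc⟩, rfl⟩
    exact ⟨k, hk, by simp, by simpa using hbc⟩
  · rintro ⟨k, hk, rfl, rfl⟩
    exact ⟨(0 + (k : Int), cs[k]), ⟨⟨k, hk, rfl⟩, by simp⟩, by simp⟩

theorem pv_mem_sel {cs : List Char} {c : Char} {x : Int} :
    x ∈ pvSel cs c ↔ ∃ k, ∃ _ : k < cs.length, x = (k : Int) ∧ cs[k] = c ∧ pvGood cs k = true := by
  unfold pvSel
  rw [List.mem_filter]
  constructor
  · rintro ⟨hmem, hcond⟩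
    rcases pv_mem_posL.mp hmem with ⟨k, hk, rfl, hck⟩
    have hcont := (Bool.and_eq_true _ _).mp hcond |>.1
    have hmatch := (Bool.and_eq_true _ _).mp hcond |>.2
    have h2 : ((k : Int) + 2) ∈ pvPosL cs c :=
      (PySem.Set.mem_ofList _ _).mp ((PySem.Set.contains_iff _ _).mp hcont)
    rcases pv_mem_posL.mp h2 with ⟨j, hj, hje, hcj⟩
    have hjk : j = k + 2 := by omega
    subst hjk
    have hk1 : k + 1 < cs.length := by omega
    have hcast : ((k : Int) + 1) = ((k + 1 : Nat) : Int) := by push_cast; ring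
    rw [hcast, PySem.List.pyGet?_natCast, List.getElem?_eq_getElem hk1] at hmatch
    have hbneq : cs[k+1] ≠ c := by
      simpa using hmatch
    refine ⟨k, hk, rfl, hck, ?_⟩
    unfold pvGood
    rw [List.getElem?_eq_getElem hk, List.getElem?_eq_getElem hk1, List.getElem?_eq_getElem hj]
    simp [hck, hcj]
    exact fun h => hbneq h.symm
  · rintro ⟨k, hk, rfl, hck, hg⟩
    have hk2 := pvGood_lt hg
    have hk1 : k + 1 < cs.length := by omega
    unfold pvGood at hg
    rw [List.getElem?_eq_getElem hk, List.getElem?_eq_getElem hk1, List.getElem?_eq_getElem hk2] at hg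
    have hg' := (Bool.and_eq_true _ _).mp hg
    have heq02 : cs[k] = cs[k+2] := by simpa using hg'.1
    have hneq01 : cs[k] ≠ cs[k+1] := by simpa using hg'.2
    refine ⟨pv_mem_posL.mpr ⟨k, hk, rfl, hck⟩, ?_⟩
    unfold pvCond
    have hcont : PySem.Set.contains (PySem.Set.ofList (pvPosL cs c)) ((k : Int) + 2) = true := by
      rw [PySem.Set.contains_iff, PySem.Set.mem_ofList]
      exact pv_mem_posL.mpr ⟨k + 2, hk2, by push_cast; ring, heq02 ▸ hck⟩
    rw [hcont]
    have hcast : ((k : Int) + 1) = ((k + 1 : Nat) : Int) := by push_cast; ring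
    rw [hcast, PySem.List.pyGet?_natCast, List.getElem?_eq_getElem hk1]
    simp
    exact fun h => hneq01 (by rw [hck, h])

theorem pv_pairwise_posL (cs : List Char) (c : Char) : (pvPosL cs c).Pairwise (· < ·) := by
  unfold pvPosL
  rw [List.pairwise_map]
  exact (PySem.List.pairwise_lt_enumerate cs 0).filter _

theorem pv_pairwise_sel (cs : List Char) (c : Char) : (pvSel cs c).Pairwise (· < ·) :=
  (pv_pairwise_posL cs c).filter _

theorem pv_nodup_sel (cs : List Char) (c : Char) : (pvSel cs c).Nodup :=
  (pv_pairwise_sel cs c).imp (fun h => ne_of_lt h)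

theorem pv_nodup_flat (cs : List Char) :
    ((PySem.Set.ofList cs).flatMap (fun c => pvSel cs c)).Nodup := by
  rw [List.nodup_flatMap]
  refine ⟨fun c _ => pv_nodup_sel cs c, ?_⟩
  refine (PySem.Set.nodup_ofList cs).imp ?_
  intro a b hab
  intro x hxa hxb
  rcases pv_mem_sel.mp hxa with ⟨k, hk, rfl, hca, _⟩
  rcases pv_mem_sel.mp hxb with ⟨j, hj, hje, hcb, _⟩
  have : j = k := by omega
  subst this
  exact hab (hca ▸ hcb ▸ rfl)

theorem pv_mem_GInt {cs : List Char} {x : Int} :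
    x ∈ pvGInt cs ↔ ∃ k : Nat, x = (k : Int) ∧ pvGood cs k = true := by
  unfold pvGInt pvG
  simp only [List.mem_map, List.mem_filter, List.mem_range]
  constructor
  · rintro ⟨k, ⟨_, hg⟩, hxe⟩
    exact ⟨k, hxe.symm, hg⟩
  · rintro ⟨k, hxe, hg⟩
    exact ⟨k, ⟨by have := pvGood_lt hg; omega, hg⟩, hxe.symm⟩

theorem pv_pairwise_GInt (cs : List Char) : (pvGInt cs).Pairwise (· < ·) := by
  unfold pvGInt pvG
  rw [List.pairwise_map]
  exact (List.pairwise_lt_range.filter _).imp (fun h => by exact_mod_cast h)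

theorem pv_nodup_GInt (cs : List Char) : (pvGInt cs).Nodup :=
  (pv_pairwise_GInt cs).imp (fun h => ne_of_lt h)

theorem pv_perm (cs : List Char) :
    (pvGInt cs).Perm ((PySem.Set.ofList cs).flatMap (fun c => pvSel cs c)) := by
  rw [List.perm_ext_iff_of_nodup (pv_nodup_GInt cs) (pv_nodup_flat cs)]
  intro x
  rw [pv_mem_GInt, List.mem_flatMap]
  constructor
  · rintro ⟨k, rfl, hg⟩
    have hk2 := pvGood_lt hg
    refine ⟨cs[k], (PySem.Set.mem_ofList _ _).mpr (List.getElem_mem _), ?_⟩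
    exact pv_mem_sel.mpr ⟨k, by omega, rfl, rfl, hg⟩
  · rintro ⟨c, _, hx⟩
    rcases pv_mem_sel.mp hx with ⟨k, hk, rfl, _, hg⟩
    exact ⟨k, rfl, hg⟩

theorem pv_sorted (cs : List Char) :
    PySem.List.sorted ((PySem.Set.ofList cs).flatMap (fun c => pvSel cs c)) (fun x => x) false
      = pvGInt cs :=
  PySem.List.sorted_eq_of_perm_of_pairwise_lt _ _ _ (pv_perm cs) (pv_pairwise_GInt cs)

theorem pvB_eq (s : String) (reverse : Bool) :
    get_aba_set_alt s reverse
      = ((pvG s.toList).map (pvPairAt reverse s.toList)).foldl PySem.Set.add [] := by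
  simp only [get_aba_set_alt]
  rw [pvOcc_items, pvHits_eq, pv_sorted]
  unfold pvGInt
  rw [List.foldl_map, List.foldl_map]
  apply PySem.List.foldl_congr_mem
  intro out k hk
  have hg : pvGood s.toList k = true := (List.mem_filter.mp hk).2
  have hk2 := pvGood_lt hg
  have hk1 : k + 1 < s.toList.length := by omega
  have hkl : k < s.toList.length := by omega
  have hcast : ((k : Int) + 1) = ((k + 1 : Nat) : Int) := by push_cast; ring
  rw [hcast, PySem.List.pyGet?_natCast, PySem.List.pyGet?_natCast,
      List.getElem?_eq_getElem hkl, List.getElem?_eq_getElem hk1]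
  have hp : pvPairAt reverse s.toList k
      = (if reverse then (String.mk [s.toList[k+1]], String.mk [s.toList[k]])
         else (String.mk [s.toList[k]], String.mk [s.toList[k+1]])) := by
    unfold pvPairAt
    rw [List.getElem?_eq_getElem hkl, List.getElem?_eq_getElem hk1]
  rw [hp]

-- ===== VERDICT (by name: the statement is the Claim_ definition above) =====
theorem get_aba_set_spec : Claim_equal_get_aba_set := by
  intro s reverse _
  unfold Spec_get_aba_set
  rw [pvA_eq, pvB_eq]
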